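-- pv_equiv track=rewrite | github.com/kappablanka/atelier3_theoPiacentini | Partie_3.py | mot_possible
-- ===== SOURCE A (Python) =====
-- def mot_possible(mot: str, lettres: str) -> bool:
--     """
--     Renvoie True ou False suivant que le mot peut s'obtenire avec les lettres passées en param
--     :param mot:
--     :type mot: str
--     :param lettres:
--     :type lettres: str
--     :return:
--     :rtype: str
--     """
--     lettres_splite = [*lettres]
--     flag_mot_possible = True
--     for e in mot:
--         if e not in lettres_splite:
--             flag_mot_possible = False
--         if e in lettres_splite:
--             lettres_splite.remove(e)
--
--     return flag_mot_possible
-- ===== SOURCE B (Python) =====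
-- def mot_possible(mot: str, lettres: str) -> bool:
--     """Multiset containment via letter counts: one pass over each string, no quadratic scans."""
--     avail = {}
--     for c in lettres:
--         avail[c] = avail.get(c, 0) + 1
--     need = {}
--     for c in mot:
--         need[c] = need.get(c, 0) + 1
--     return all(avail.get(c, 0) >= n for c, n in need.items())
-- ===== Notes on version B (the rewrite author's own statement) =====
-- stated objective: faster
-- what changed: Replaces A's per-letter membership test plus list.remove scans over a shrinking copy of lettres with two one-pass count dictionaries that are compared once per distinct letter.
import Mathlib
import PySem

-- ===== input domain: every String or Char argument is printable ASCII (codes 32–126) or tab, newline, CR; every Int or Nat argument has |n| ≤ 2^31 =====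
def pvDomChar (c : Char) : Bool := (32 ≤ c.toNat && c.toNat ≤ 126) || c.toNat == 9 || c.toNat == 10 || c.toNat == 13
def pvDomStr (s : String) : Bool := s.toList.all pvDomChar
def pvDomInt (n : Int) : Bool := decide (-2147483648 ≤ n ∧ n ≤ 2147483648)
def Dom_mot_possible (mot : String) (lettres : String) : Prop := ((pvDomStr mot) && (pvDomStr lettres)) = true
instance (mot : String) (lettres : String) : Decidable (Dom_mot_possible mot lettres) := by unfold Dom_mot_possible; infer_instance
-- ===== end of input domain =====

-- B replaces A's per-letter membership test + list.remove over a shrinking list with two one-pass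
-- count dictionaries compared once (objective: faster).

-- ===== PORT A =====
-- A's loop state: (lettres_splite, flag). 'lettres_splite.remove(e)' runs only under 'if e in
-- lettres_splite', so it is exactly List.erase (remove the first occurrence; cf. PySem.List.remove?_eq_some_erase).
def mot_possible (mot : String) (lettres : String) : Bool :=
  (mot.toList.foldl
    (fun (st : List Char × Bool) e =>
      let flag := if e ∈ st.1 then st.2 else false
      let ls := if e ∈ st.1 then st.1.erase e else st.1
      (ls, flag))
    (lettres.toList, true)).2

-- ===== PORT B =====
def mot_possible_alt (mot : String) (lettres : String) : Bool :=
  let avail := lettres.toList.foldl (fun d c => d.insert c (d.getD c 0 + 1)) (PySem.Dict.empty : PySem.Dict Char Int)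
  let need := mot.toList.foldl (fun d c => d.insert c (d.getD c 0 + 1)) (PySem.Dict.empty : PySem.Dict Char Int)
  need.items.all (fun p => avail.getD p.1 0 ≥ p.2)

-- ===== PRECONDITION & SPEC =====
def Spec_mot_possible (mot : String) (lettres : String) (out : Bool) : Prop := out = mot_possible_alt mot lettres
instance (mot : String) (lettres : String) (out : Bool) : Decidable (Spec_mot_possible mot lettres out) := by unfold Spec_mot_possible; infer_instance

-- ===== CLAIM (what is proved, stated in full; the proofs are below) =====
def Claim_equal_mot_possible : Prop := ∀ (mot : String) (lettres : String), Dom_mot_possible mot lettres → Spec_mot_possible mot lettres (mot_possible mot lettres)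

-- ===== LEMMAS AND PROOFS =====

-- A's loop computes: initial flag AND "every char of m occurs in m at most as often as in L".
set_option maxRecDepth 4096 in
lemma mot_possible_loop (m : List Char) (L : List Char) (f : Bool) :
    (m.foldl
      (fun (st : List Char × Bool) e =>
        let flag := if e ∈ st.1 then st.2 else false
        let ls := if e ∈ st.1 then st.1.erase e else st.1
        (ls, flag))
      (L, f)).2 = (f && decide (∀ c ∈ m, m.count c ≤ L.count c)) := by
  induction m generalizing L f with
  | nil => simp
  | cons e rest ih =>
    by_cases he : e ∈ L
    · rw [List.foldl_cons]
      simp only [if_pos he]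
      rw [ih]
      have hL := List.count_pos_iff.mpr he
      have hiff : (∀ c ∈ rest, rest.count c ≤ (L.erase e).count c) ↔
          (∀ c ∈ e :: rest, (e :: rest).count c ≤ L.count c) := by
        constructor
        · intro h c hmem
          by_cases hcc : c = e
          · subst hcc
            rw [List.count_cons_self]
            by_cases hce : c ∈ rest
            · have h2 := h c hce; rw [List.count_erase_self] at h2; omega
            · rw [List.count_eq_zero_of_not_mem hce]; omega
          · rcases List.mem_cons.mp hmem with rfl | hc
            · exact absurd rfl hcc
            · have h2 := h c hc
              rw [List.count_erase_of_ne hcc] at h2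
              have h3 := (List.count_cons (a := c) (b := e) (l := rest))
              simp only [beq_iff_eq] at h3
              rw [if_neg (Ne.symm hcc)] at h3
              omega
        · intro h c hc
          by_cases hcc : c = e
          · subst hcc
            have h2 := h c (List.mem_cons_self ..)
            rw [List.count_cons_self] at h2
            rw [List.count_erase_self]; omega
          · have h2 := h c (List.mem_cons_of_mem _ hc)
            have h3 := (List.count_cons (a := c) (b := e) (l := rest))
            simp only [beq_iff_eq] at h3
            rw [if_neg (Ne.symm hcc)] at h3
            rw [List.count_erase_of_ne hcc]
            omega
      rw [decide_eq_decide.mpr hiff]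
    · rw [List.foldl_cons]
      simp only [if_neg he]
      rw [ih, Bool.false_and]
      have hnot : ¬ (∀ c ∈ e :: rest, (e :: rest).count c ≤ L.count c) := by
        intro h
        have h1 := h e (List.mem_cons_self ..)
        rw [List.count_cons_self, List.count_eq_zero_of_not_mem he] at h1
        omega
      rw [decide_eq_false hnot, Bool.and_false]

-- B computes the same decide.
lemma mot_possible_alt_eq (mot lettres : String) :
    mot_possible_alt mot lettres
      = decide (∀ c ∈ mot.toList, mot.toList.count c ≤ lettres.toList.count c) := by
  unfold mot_possible_alt
  simp only [PySem.Dict.foldl_insert_getD_add_one_eq_counter, PySem.Dict.items_counter,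
    PySem.Dict.getD_counter, List.all_map]
  rw [Bool.eq_iff_iff, List.all_eq_true, decide_eq_true_iff]
  constructor
  · intro h c hc
    have hc' : c ∈ PySem.Set.ofList mot.toList := (PySem.Set.mem_ofList ..).mpr hc
    have h2 := h c hc'
    simp only [Function.comp, ge_iff_le, decide_eq_true_iff] at h2
    exact_mod_cast h2
  · intro h c hc
    have hc' : c ∈ mot.toList := (PySem.Set.mem_ofList ..).mp hc
    simp only [Function.comp, ge_iff_le, decide_eq_true_iff]
    exact_mod_cast h c hc'

-- ===== VERDICT (by name: the statement is the Claim_ definition above) =====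
theorem mot_possible_spec : Claim_equal_mot_possible := by
  intro mot lettres _
  unfold Spec_mot_possible mot_possible
  rw [mot_possible_loop, mot_possible_alt_eq, Bool.true_and]
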